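-- pv_equiv track=rewrite | github.com/dustinsnoap/Legends_of_Alabastra | pictobit.py | createTileRow
-- ===== SOURCE A (Python) =====
-- def createTileRow(image_row, colors, tile_size):
--     tiles = []
--     for t in range(len(image_row[0])//tile_size): tiles.append([])
--     for i, row in enumerate(image_row):
--         tile_row = list()
--         for col_num, col in enumerate(row):
--             color_index = 0 if col == 0 else colors[col]
--             tile_row.append(color_index)
--             if len(tile_row) == tile_size:
--                 index = col_num // tile_size
--                 tiles[index].append(tile_row)
--                 tile_row = []
--     return tiles
-- ===== SOURCE B (Python) =====
-- def createTileRow(image_row, colors, tile_size):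
--     num_tiles = len(image_row[0]) // tile_size
--     return [[[0 if col == 0 else colors[col]
--               for col in row[k * tile_size:(k + 1) * tile_size]]
--              for row in image_row
--              if len(row) >= (k + 1) * tile_size]
--             for k in range(num_tiles)]
-- ===== Notes on version B (the rewrite author's own statement) =====
-- stated objective: alternative
-- what changed: Swaps the loop nesting: instead of A's per-pixel buffer-and-flush state machine mutating a tiles list, B builds each tile bucket directly with a per-tile-index nested comprehension that slices the k-th full chunk out of every sufficiently long row.
import Mathlib
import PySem

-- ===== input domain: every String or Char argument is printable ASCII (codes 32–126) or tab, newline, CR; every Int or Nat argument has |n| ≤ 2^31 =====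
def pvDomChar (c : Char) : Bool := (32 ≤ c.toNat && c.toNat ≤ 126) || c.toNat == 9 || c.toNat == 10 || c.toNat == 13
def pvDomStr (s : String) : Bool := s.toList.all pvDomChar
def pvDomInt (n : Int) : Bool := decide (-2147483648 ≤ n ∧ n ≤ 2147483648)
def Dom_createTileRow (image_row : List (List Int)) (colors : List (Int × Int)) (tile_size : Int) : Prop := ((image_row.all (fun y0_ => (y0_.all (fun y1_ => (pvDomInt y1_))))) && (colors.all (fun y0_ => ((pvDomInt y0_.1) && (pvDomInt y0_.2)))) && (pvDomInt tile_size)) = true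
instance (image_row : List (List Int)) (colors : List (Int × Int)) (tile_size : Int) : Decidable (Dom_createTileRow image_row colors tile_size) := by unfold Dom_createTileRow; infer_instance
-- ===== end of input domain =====

-- ===== PORT A =====
-- B swaps the loop nesting: instead of A's per-pixel buffer-and-flush state machine mutating
-- a tiles list, B builds each tile bucket directly with a per-tile-index nested comprehension
-- (objective: alternative); return values agree on all of Pre_.
-- shared helper: the expression `0 if col == 0 else colors[col]` occurring verbatim in both Pythons
-- (colors is a Python dict; getD 0 is reached only outside Pre_, which requires the key present)
def pvColor (colors : List (Int × Int)) (col : Int) : Int :=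
  if col == 0 then 0 else (PySem.Dict.ofList colors).getD col 0

def createTileRow (image_row : List (List Int)) (colors : List (Int × Int)) (tile_size : Int) : List (List (List Int)) :=
  -- tiles = []; for t in range(len(image_row[0])//tile_size): tiles.append([])
  let tiles0 : List (List (List Int)) :=
    (PySem.List.pyRange 0 (PySem.Int.floordiv ((image_row.headD []).length : Int) tile_size) 1).foldl
      (fun acc _ => acc ++ [[]]) []
  -- for i, row in enumerate(image_row): per-pixel buffer tile_row, flushed into tiles[col_num//tile_size] when full
  image_row.foldl (fun tiles row =>
    ((PySem.List.enumerate row 0).foldl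
      (fun (st : List Int × List (List (List Int))) q =>
        let tile_row := st.1 ++ [pvColor colors q.2]
        if (tile_row.length : Int) == tile_size then
          ([], st.2.modify (PySem.Int.floordiv q.1 tile_size).toNat (· ++ [tile_row]))
        else (tile_row, st.2))
      ([], tiles)).2) tiles0

-- ===== PORT B =====
def createTileRow_alt (image_row : List (List Int)) (colors : List (Int × Int)) (tile_size : Int) : List (List (List Int)) :=
  -- num_tiles = len(image_row[0]) // tile_size
  let num_tiles := PySem.Int.floordiv ((image_row.headD []).length : Int) tile_size
  -- [[[0 if col == 0 else colors[col] for col in row[k*ts:(k+1)*ts]]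
  --   for row in image_row if len(row) >= (k+1)*ts] for k in range(num_tiles)]
  (PySem.List.pyRange 0 num_tiles 1).map (fun k =>
    (image_row.filter (fun row => decide ((k + 1) * tile_size ≤ (row.length : Int)))).map
      (fun row =>
        (PySem.List.slice row (some (k * tile_size)) (some ((k + 1) * tile_size))).map
          (pvColor colors)))

-- ===== PRECONDITION & SPEC =====
-- Pre_ excludes exactly the inputs where Python A raises: empty image_row (IndexError),
-- tile_size == 0 (ZeroDivisionError), a nonzero pixel not a key of colors (KeyError), and,
-- for positive tile_size, a row producing more full chunks than row 0 allows (IndexError on tiles[index]).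
def Pre_createTileRow (image_row : List (List Int)) (colors : List (Int × Int)) (tile_size : Int) : Prop :=
  image_row ≠ [] ∧ tile_size ≠ 0 ∧
  (∀ row ∈ image_row, ∀ c ∈ row, c ≠ 0 → (PySem.Dict.ofList colors).contains c = true) ∧
  (0 < tile_size → ∀ row ∈ image_row,
    row.length / tile_size.toNat ≤ (image_row.headD []).length / tile_size.toNat)
instance (image_row : List (List Int)) (colors : List (Int × Int)) (tile_size : Int) : Decidable (Pre_createTileRow image_row colors tile_size) := by unfold Pre_createTileRow; infer_instance

def pvWitness_createTileRow : List (List Int) × (List (Int × Int)) × Int :=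
  ([[1, 0], [2, 2]], [(1, 5), (2, 7)], 2)

def Spec_createTileRow (image_row : List (List Int)) (colors : List (Int × Int)) (tile_size : Int) (out : List (List (List Int))) : Prop := out = createTileRow_alt image_row colors tile_size
instance (image_row : List (List Int)) (colors : List (Int × Int)) (tile_size : Int) (out : List (List (List Int))) : Decidable (Spec_createTileRow image_row colors tile_size out) := by unfold Spec_createTileRow; infer_instance

-- ===== CLAIM (what is proved, stated in full; the proofs are below) =====
def Claim_equal_createTileRow : Prop := ∀ (image_row : List (List Int)) (colors : List (Int × Int)) (tile_size : Int), Dom_createTileRow image_row colors tile_size → Pre_createTileRow image_row colors tile_size → Spec_createTileRow image_row colors tile_size (createTileRow image_row colors tile_size)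

-- ===== LEMMAS AND PROOFS =====

-- A's per-row state machine as a recursion: tr is the partial buffer, c the next chunk index.
def fillChunks (t : Nat) (tr : List Int) (l : List Int) (c : Nat)
    (tiles : List (List (List Int))) : List (List (List Int)) :=
  match l with
  | [] => tiles
  | x :: xs =>
    if (tr ++ [x]).length = t then fillChunks t [] xs (c + 1) (tiles.modify c (· ++ [tr ++ [x]]))
    else fillChunks t (tr ++ [x]) xs c tiles

-- the same machine consuming t elements at a time
def addChunks (t : Nat) (l : List Int) (c : Nat)
    (tiles : List (List (List Int))) : List (List (List Int)) :=
  if _h : 0 < t ∧ t ≤ l.length then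
    addChunks t (l.drop t) (c + 1) (tiles.modify c (· ++ [l.take t]))
  else tiles
termination_by l.length
decreasing_by simp; omega

theorem enumerate_map {α β : Type} (f : α → β) (l : List α) (s : Int) :
    PySem.List.enumerate (l.map f) s = (PySem.List.enumerate l s).map (fun p => (p.1, f p.2)) := by
  induction l generalizing s with
  | nil => rfl
  | cons x xs ih => simp [PySem.List.enumerate_cons, ih]

-- A's inner fold over `enumerate` of a pre-mapped row is the fillChunks state machine.
theorem foldA_eq_fill (t : Nat) (ht : 0 < t) (l : List Int) :
    ∀ (tr : List Int) (c : Nat) (tiles : List (List (List Int))), tr.length < t →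
    ((PySem.List.enumerate l ((c * t + tr.length : Nat) : Int)).foldl
      (fun (st : List Int × List (List (List Int))) q =>
        let tile_row := st.1 ++ [q.2]
        if (tile_row.length : Int) == (t : Int) then
          ([], st.2.modify (PySem.Int.floordiv q.1 (t : Int)).toNat (· ++ [tile_row]))
        else (tile_row, st.2))
      (tr, tiles)).2 = fillChunks t tr l c tiles := by
  induction l with
  | nil => intro tr c tiles _; rfl
  | cons x xs ih =>
    intro tr c tiles htr
    rw [PySem.List.enumerate_cons, List.foldl_cons, fillChunks]
    simp only []
    by_cases hfull : tr.length + 1 = t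
    · rw [if_pos (by simp [beq_iff_eq]; omega), if_pos (by simp; omega)]
      have hidx : (PySem.Int.floordiv ((c * t + tr.length : Nat) : Int) (t : Int)).toNat = c := by
        rw [PySem.Int.floordiv_natCast, Int.toNat_natCast, show c * t + tr.length = t * c + tr.length by ring,
          Nat.mul_add_div ht, Nat.div_eq_of_lt htr]
        omega
      have hs : ((c * t + tr.length : Nat) : Int) + 1 = (((c + 1) * t + ([] : List Int).length : Nat) : Int) := by
        have hnat : c * t + tr.length + 1 = (c + 1) * t + ([] : List Int).length := by
          simp [Nat.succ_mul]; omega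
        exact_mod_cast hnat
      rw [hidx, hs, ih [] (c + 1) (tiles.modify c (· ++ [tr ++ [x]])) ht]
    · rw [if_neg (by simp [beq_iff_eq]; omega), if_neg (by simp; omega)]
      have hs : ((c * t + tr.length : Nat) : Int) + 1 = ((c * t + (tr ++ [x]).length : Nat) : Int) := by
        push_cast; simp; ring
      rw [hs, ih (tr ++ [x]) c tiles (by simp; omega)]

-- consuming one full chunk of fillChunks at once
theorem fill_consume (t : Nat) : ∀ (l tr : List Int) (k c : Nat) (tiles : List (List (List Int))),
    tr.length + k = t → 0 < k →
    fillChunks t tr l c tiles =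
      if k ≤ l.length then fillChunks t [] (l.drop k) (c + 1) (tiles.modify c (· ++ [tr ++ l.take k]))
      else tiles := by
  intro l
  induction l with
  | nil =>
    intro tr k c tiles hk hkpos
    rw [if_neg (by simp; omega)]
    rfl
  | cons x xs ih =>
    intro tr k c tiles hk hkpos
    rw [fillChunks]
    by_cases h1 : k = 1
    · subst h1
      rw [if_pos (by simp; omega), if_pos (by simp)]
      simp
    · rw [if_neg (by simp; omega)]
      rw [ih (tr ++ [x]) (k - 1) c tiles (by simp; omega) (by omega)]
      have htake : tr ++ [x] ++ xs.take (k - 1) = tr ++ (x :: xs).take k := by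
        have h : (x :: xs).take k = x :: xs.take (k - 1) := by
          conv_lhs => rw [show k = (k - 1) + 1 by omega]
          rw [List.take_succ_cons]
        simp [h]
      have hdrop : xs.drop (k - 1) = (x :: xs).drop k := by
        conv_rhs => rw [show k = (k - 1) + 1 by omega]
        rw [List.drop_succ_cons]
      rw [htake, hdrop]
      by_cases h2 : k ≤ (x :: xs).length
      · rw [if_pos (by simp at h2 ⊢; omega), if_pos h2]
      · rw [if_neg (by simp at h2 ⊢; omega), if_neg h2]

theorem fill_eq_add (t : Nat) (ht : 0 < t) :
    ∀ (n : Nat) (l : List Int), l.length = n → ∀ (c : Nat) (tiles : List (List (List Int))),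
    fillChunks t [] l c tiles = addChunks t l c tiles := by
  intro n
  induction n using Nat.strong_induction_on with
  | _ n ih =>
    intro l hl c tiles
    rw [fill_consume t l [] t c tiles (by simp) ht]
    by_cases h : t ≤ l.length
    · rw [if_pos h, ih ((l.drop t).length) (by simp; omega) (l.drop t) rfl (c + 1)]
      conv_rhs => rw [addChunks]
      rw [dif_pos ⟨ht, h⟩]
      simp
    · rw [if_neg h, addChunks, dif_neg (by omega)]

-- bucket-wise effect of addChunks
theorem addChunks_getElem? (t : Nat) (ht : 0 < t) :
    ∀ (l : List Int) (c : Nat) (tiles : List (List (List Int))) (k : Nat),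
    (addChunks t l c tiles)[k]? = tiles[k]?.map (fun x =>
      if c ≤ k ∧ (k - c + 1) * t ≤ l.length then x ++ [(l.drop ((k - c) * t)).take t] else x) := by
  intro l
  induction hn : l.length using Nat.strong_induction_on generalizing l with
  | _ n ih =>
    subst hn
    intro c tiles k
    rw [addChunks]
    split
    · next h =>
      rw [ih ((l.drop t).length) (by simp; omega) _ rfl, List.getElem?_modify]
      simp only [Option.map_eq_map, Option.map_map]
      refine congrArg (fun g => Option.map g tiles[k]?) (funext fun x => ?_)
      simp only [Function.comp, List.length_drop]
      by_cases hkc : c = k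
      · subst hkc
        rw [if_pos rfl, if_neg (by omega), if_pos ⟨le_refl c, by simp; omega⟩]
        simp
      · rw [if_neg hkc]
        by_cases hck : c + 1 ≤ k
        · have hsub : k - (c + 1) + 1 = k - c := by omega
          by_cases hfit : (k - c + 1) * t ≤ l.length
          · have hd : (k - c + 1) * t = (k - c) * t + t := by ring
            rw [if_pos ⟨hck, by rw [hsub]; omega⟩, if_pos ⟨by omega, hfit⟩, List.drop_drop]
            congr 3
            have hkc1 : k - c = (k - (c + 1)) + 1 := by omega
            rw [hkc1, Nat.succ_mul, Nat.add_comm]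
          · have hd : (k - c + 1) * t = (k - c) * t + t := by ring
            rw [if_neg (by rw [hsub]; intro hc; omega), if_neg (by intro hc; exact hfit hc.2)]
        · rw [if_neg (by intro hc; exact hck hc.1), if_neg (by intro hc; omega)]
    · next h =>
      have hbig : ¬ (c ≤ k ∧ (k - c + 1) * t ≤ l.length) := by
        intro hc
        have h1 : t ≤ (k - c + 1) * t := Nat.le_mul_of_pos_left t (by omega)
        omega
      cases tiles[k]? with
      | none => rfl
      | some a => simp [hbig]

-- fold of A's per-row machine over all rows, bucket-wise
theorem fold_rows (colors : List (Int × Int)) (t : Nat) (ht : 0 < t) :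
    ∀ (rows : List (List Int)) (T : List (List (List Int))) (k : Nat),
    (rows.foldl (fun tiles row => addChunks t (row.map (pvColor colors)) 0 tiles) T)[k]? =
    T[k]?.map (fun x => x ++
      (rows.filter (fun row => decide ((k + 1) * t ≤ row.length))).map
        (fun row => ((row.map (pvColor colors)).drop (k * t)).take t)) := by
  intro rows
  induction rows with
  | nil => intro T k; simp
  | cons r rs ih =>
    intro T k
    rw [List.foldl_cons, ih, addChunks_getElem? t ht, Option.map_map]
    apply congrArg (T[k]?.map ·)
    funext x
    simp only [Function.comp, Nat.sub_zero, List.length_map, List.filter_cons, Nat.zero_le,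
      true_and]
    by_cases hc : (k + 1) * t ≤ r.length
    · rw [if_pos hc]
      simp [hc]
    · rw [if_neg hc]
      simp [hc]

-- for negative tile_size A's inner loop never flushes a tile
theorem foldA_neg (colors : List (Int × Int)) (ts : Int) (hts : ts < 0) (l : List (Int × Int)) :
    ∀ (st : List Int × List (List (List Int))),
    (l.foldl
      (fun (st : List Int × List (List (List Int))) q =>
        let tile_row := st.1 ++ [pvColor colors q.2]
        if (tile_row.length : Int) == ts then
          ([], st.2.modify (PySem.Int.floordiv q.1 ts).toNat (· ++ [tile_row]))
        else (tile_row, st.2))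
      st).2 = st.2 := by
  induction l with
  | nil => intro st; rfl
  | cons x xs ih =>
    intro st
    rw [List.foldl_cons]
    simp only []
    rw [if_neg (by simp [beq_iff_eq]; omega)]
    exact ih _

-- the two initial tile lists coincide
theorem tiles0_eq (n : Int) :
    (PySem.List.pyRange 0 n 1).foldl (fun (acc : List (List (List Int))) _ => acc ++ [[]]) []
      = (PySem.List.pyRange 0 n 1).map (fun _ => []) := by
  rw [PySem.List.foldl_append_singleton_eq_map]
  rfl

-- A's whole per-row body equals the addChunks machine (positive tile_size)
theorem rowA_eq_addChunks (colors : List (Int × Int)) (t : Nat) (ht : 0 < t)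
    (tiles : List (List (List Int))) (row : List Int) :
    ((PySem.List.enumerate row 0).foldl
      (fun (st : List Int × List (List (List Int))) q =>
        let tile_row := st.1 ++ [pvColor colors q.2]
        if (tile_row.length : Int) == (t : Int) then
          ([], st.2.modify (PySem.Int.floordiv q.1 (t : Int)).toNat (· ++ [tile_row]))
        else (tile_row, st.2))
      ([], tiles)).2 = addChunks t (row.map (pvColor colors)) 0 tiles := by
  have hfuse :
      ((PySem.List.enumerate row 0).foldl
        (fun (st : List Int × List (List (List Int))) q =>
          let tile_row := st.1 ++ [pvColor colors q.2]
          if (tile_row.length : Int) == (t : Int) then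
            ([], st.2.modify (PySem.Int.floordiv q.1 (t : Int)).toNat (· ++ [tile_row]))
          else (tile_row, st.2))
        ([], tiles))
      = ((PySem.List.enumerate (row.map (pvColor colors)) 0).foldl
        (fun (st : List Int × List (List (List Int))) q =>
          let tile_row := st.1 ++ [q.2]
          if (tile_row.length : Int) == (t : Int) then
            ([], st.2.modify (PySem.Int.floordiv q.1 (t : Int)).toNat (· ++ [tile_row]))
          else (tile_row, st.2))
        ([], tiles)) := by
    rw [enumerate_map, List.foldl_map]
  rw [hfuse]
  have h0 : (0 : Int) = ((0 * t + ([] : List Int).length : Nat) : Int) := by simp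
  rw [h0, foldA_eq_fill t ht (row.map (pvColor colors)) [] 0 tiles ht,
    fill_eq_add t ht _ (row.map (pvColor colors)) rfl 0 tiles]

-- ===== VERDICT (by name: the statement is the Claim_ definition above) =====
theorem createTileRow_spec : Claim_equal_createTileRow := by
  intro image_row colors tile_size _ hpre
  obtain ⟨-, hts0, -, -⟩ := hpre
  unfold Spec_createTileRow createTileRow createTileRow_alt
  simp only []
  rw [tiles0_eq]
  by_cases hpos : 0 < tile_size
  · obtain ⟨t, rfl⟩ : ∃ t : Nat, tile_size = (t : Int) := ⟨tile_size.toNat, by omega⟩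
    have ht : 0 < t := by exact_mod_cast hpos
    simp only [rowA_eq_addChunks colors t ht]
    apply List.ext_getElem?
    intro k
    rw [fold_rows colors t ht, List.getElem?_map, List.getElem?_map,
      PySem.List.getElem?_pyRange_one]
    by_cases hk : k < ((PySem.Int.floordiv ((image_row.headD []).length : Int) ((t : Nat) : Int)) - 0).toNat
    · rw [if_pos hk]
      simp only [Option.map_some]
      congr 1
      have hfil : ∀ row : List Int,
          (decide ((0 + (k : Int) + 1) * ((t : Nat) : Int) ≤ (row.length : Int)))
            = (decide ((k + 1) * t ≤ row.length)) := by
        intro row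
        simp only [decide_eq_decide]
        rw [show ((0 : Int) + (k : Int) + 1) * ((t : Nat) : Int) = (((k + 1) * t : Nat) : Int) by
          push_cast; ring]
        exact Nat.cast_le
      have hmap : ∀ row : List Int,
          (PySem.List.slice row (some ((0 + (k : Int)) * ((t : Nat) : Int)))
              (some ((0 + (k : Int) + 1) * ((t : Nat) : Int)))).map (pvColor colors)
            = ((row.map (pvColor colors)).drop (k * t)).take t := by
        intro row
        rw [show ((0 : Int) + (k : Int)) * ((t : Nat) : Int) = (((k * t : Nat)) : Int) by
            push_cast; ring,
          show ((0 : Int) + (k : Int) + 1) * ((t : Nat) : Int) = ((((k + 1) * t : Nat)) : Int) by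
            push_cast; ring,
          PySem.List.slice_toNat _ (Int.natCast_nonneg _) (Int.natCast_nonneg _),
          Int.toNat_natCast, Int.toNat_natCast,
          show (k + 1) * t - k * t = t by rw [Nat.succ_mul]; omega,
          List.map_take, List.map_drop]
      simp only [hfil, hmap, List.nil_append]
    · rw [if_neg hk]
      rfl
  · have hneg : tile_size < 0 := by omega
    have hN : PySem.Int.floordiv ((image_row.headD []).length : Int) tile_size ≤ 0 := by
      have h1 : PySem.Int.floordiv ((image_row.headD []).length : Int) tile_size
          = PySem.Int.floordiv (-(((image_row.headD []).length : Int))) (-tile_size) :=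
        (PySem.Int.floordiv_neg_neg _ _).symm
      have h2 : ¬ (1 ≤ PySem.Int.floordiv (-(((image_row.headD []).length : Int))) (-tile_size)) := by
        rw [PySem.Int.le_floordiv_iff_mul_le (by omega)]
        have := Int.natCast_nonneg (image_row.headD []).length
        omega
      omega
    rw [PySem.List.pyRange_one_eq_nil hN]
    simp only [List.map_nil]
    have hid : ∀ (rows : List (List Int)) (tiles : List (List (List Int))),
        rows.foldl (fun tiles row =>
          ((PySem.List.enumerate row 0).foldl
            (fun (st : List Int × List (List (List Int))) q =>
              let tile_row := st.1 ++ [pvColor colors q.2]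
              if (tile_row.length : Int) == tile_size then
                ([], st.2.modify (PySem.Int.floordiv q.1 tile_size).toNat (· ++ [tile_row]))
              else (tile_row, st.2))
            ([], tiles)).2) tiles = tiles := by
      intro rows
      induction rows with
      | nil => intro tiles; rfl
      | cons r rs ih =>
        intro tiles
        rw [List.foldl_cons, foldA_neg colors tile_size hneg]
        exact ih _
    exact hid image_row []
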